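-- pv_equiv track=rewrite | github.com/ckallum/Daily-Coding-Problem | solutions/#081.py | find_possible_combinations
-- ===== SOURCE A (Python) =====
-- def find_possible_combinations(mappings, string):
--     combination_dict = {"": [""]}
--
--     for index, value in enumerate(string):
--         combination_dict[string[:index + 1]] = []
--         if value in mappings:
--             combination_dict[string[:index + 1]] = [x + v for x in combination_dict[string[:index]] for v in
--                                                     mappings[value]]
--         else:
--             combination_dict[string[:index + 1]] = combination_dict[string[:index]]
--     if string in mappings:
--         if combination_dict[string] == [""]:
--             combination_dict[string] = mappings[string]
--         else:
--             combination_dict[string].extend(mappings[string])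
--
--     return combination_dict[string]
-- ===== SOURCE B (Python) =====
-- def find_possible_combinations(mappings, string):
--     factors = [mappings[c] for c in string if c in mappings]
--
--     def prod(i):
--         if i == len(factors):
--             return [""]
--         rest = prod(i + 1)
--         return [v + s for v in factors[i] for s in rest]
--
--     combos = prod(0)
--     if string in mappings:
--         extra = mappings[string]
--         combos = list(extra) if combos == [""] else combos + extra
--     return combos
-- ===== Notes on version B (the rewrite author's own statement) =====
-- stated objective: faster
-- what changed: Replaced A's dict keyed by every prefix of the string (each step slices and hashes a growing prefix key) by collecting the factor lists once and taking their product with a single back-to-front recursion; the trailing whole-string special case is kept.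
import Mathlib
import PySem

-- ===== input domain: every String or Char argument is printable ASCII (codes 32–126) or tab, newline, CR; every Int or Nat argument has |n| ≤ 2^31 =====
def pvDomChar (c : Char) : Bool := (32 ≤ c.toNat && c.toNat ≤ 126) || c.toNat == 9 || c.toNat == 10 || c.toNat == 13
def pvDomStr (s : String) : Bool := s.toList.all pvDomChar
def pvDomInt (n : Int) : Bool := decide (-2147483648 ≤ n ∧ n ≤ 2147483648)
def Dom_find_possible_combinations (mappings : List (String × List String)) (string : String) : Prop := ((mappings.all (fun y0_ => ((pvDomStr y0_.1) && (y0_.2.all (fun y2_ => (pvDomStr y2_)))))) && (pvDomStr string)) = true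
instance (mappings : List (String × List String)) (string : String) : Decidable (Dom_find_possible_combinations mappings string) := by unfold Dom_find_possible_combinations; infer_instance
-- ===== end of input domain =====

-- B replaces A's dict of per-prefix result lists by a filterMap of factor lists and one
-- back-to-front recursive product over them, avoiding the quadratic prefix-key slicing (objective: faster; measured). Return value only; neither mutates its inputs.

-- ===== PORT A =====
-- one loop step of A's `for index, value in enumerate(string)` (cs0 = string as a char list;
-- string[:index+1] / string[:index] are ported as takes of cs0, exact since index ≥ 0 here)
def pvStepA (M : PySem.Dict String (List String)) (cs0 : List Char)
    (d : PySem.Dict String (List String)) (iv : Int × Char) : PySem.Dict String (List String) :=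
  let index := iv.1
  let value := iv.2
  let pre1 := String.ofList (cs0.take (index + 1).toNat)
  let pre0 := String.ofList (cs0.take index.toNat)
  let d := d.insert pre1 ([] : List String)
  match M.get? (String.ofList [value]) with
  | some mv => d.insert pre1 ((d.getD pre0 []).flatMap (fun x => mv.map (fun v => x ++ v)))
  | none => d.insert pre1 (d.getD pre0 [])

def find_possible_combinations (mappings : List (String × List String)) (string : String) : List String :=
  let M := PySem.Dict.ofList mappings
  let d : PySem.Dict String (List String) := (PySem.Dict.empty).insert "" [""]
  let d := (PySem.List.enumerate string.toList 0).foldl (pvStepA M string.toList) d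
  let d :=
    match M.get? string with
    | some ms =>
        if d.getD string [] = [""] then d.insert string ms
        else d.insert string ((d.getD string []) ++ ms)
    | none => d
  d.getD string []

-- ===== PORT B =====
-- Source B's prod(i): the product of the suffix of factors, built back-to-front
def pvProdSuffix (factors : List (List String)) : List String :=
  match factors with
  | [] => [""]
  | f :: rest =>
      let r := pvProdSuffix rest
      f.flatMap (fun v => r.map (fun s => v ++ s))

def find_possible_combinations_alt (mappings : List (String × List String)) (string : String) : List String :=
  let M := PySem.Dict.ofList mappings
  let factors := string.toList.filterMap (fun c => M.get? (String.ofList [c]))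
  let combos := pvProdSuffix factors
  match M.get? string with
  | some extra => if combos = [""] then extra else combos ++ extra
  | none => combos

-- ===== PRECONDITION & SPEC =====
def Spec_find_possible_combinations (mappings : List (String × List String)) (string : String) (out : List String) : Prop := out = find_possible_combinations_alt mappings string
instance (mappings : List (String × List String)) (string : String) (out : List String) : Decidable (Spec_find_possible_combinations mappings string out) := by unfold Spec_find_possible_combinations; infer_instance

-- ===== CLAIM (what is proved, stated in full; the proofs are below) =====
def Claim_equal_find_possible_combinations : Prop := ∀ (mappings : List (String × List String)) (string : String), Dom_find_possible_combinations mappings string → Spec_find_possible_combinations mappings string (find_possible_combinations mappings string)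

-- ===== LEMMAS AND PROOFS =====

-- A's per-character accumulation, abstracted away from the dict
def pvMFold (M : PySem.Dict String (List String)) (acc : List String) : List Char → List String
  | [] => acc
  | c :: cs =>
      match M.get? (String.ofList [c]) with
      | some mv => pvMFold M (acc.flatMap (fun x => mv.map (fun v => x ++ v))) cs
      | none => pvMFold M acc cs

theorem pvMk_ne_of_length_ne {l l' : List Char} (h : l.length ≠ l'.length) :
    String.ofList l ≠ String.ofList l' := by
  intro he
  apply h
  have h2 : l = l' := by simpa using congrArg String.toList he
  rw [h2]

theorem pvLoopA (M : PySem.Dict String (List String)) :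
    ∀ (rest cs : List Char) (d : PySem.Dict String (List String)) (acc : List String),
      d.getD (String.ofList cs) [] = acc →
      (((PySem.List.enumerate rest (cs.length : Int)).foldl
          (pvStepA M (cs ++ rest)) d).getD (String.ofList (cs ++ rest)) []) = pvMFold M acc rest := by
  intro rest
  induction rest with
  | nil =>
      intro cs d acc hd
      simpa [PySem.List.enumerate, pvMFold] using hd
  | cons c rest ih =>
      intro cs d acc hd
      rw [PySem.List.enumerate_cons]
      simp only [List.foldl_cons]
      have hne : String.ofList cs ≠ String.ofList (cs ++ [c]) :=
        pvMk_ne_of_length_ne (by simp)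
      have htake1 : ((cs ++ c :: rest).take ((cs.length : Int) + 1).toNat) = cs ++ [c] := by
        have : cs ++ c :: rest = (cs ++ [c]) ++ rest := by simp
        rw [this]
        have hlen : ((cs.length : Int) + 1).toNat = (cs ++ [c]).length := by simp
        rw [hlen, List.take_left]
      have htake0 : ((cs ++ c :: rest).take ((cs.length : Int)).toNat) = cs := by
        have hlen : ((cs.length : Int)).toNat = cs.length := by simp
        rw [hlen, List.take_append]
        simp
      -- compute the new dict's value at the new prefix
      have hval : (pvStepA M (cs ++ c :: rest) d ((cs.length : Int), c)).getD (String.ofList (cs ++ [c])) [] =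
          (match M.get? (String.ofList [c]) with
           | some mv => acc.flatMap (fun x => mv.map (fun v => x ++ v))
           | none => acc) := by
        unfold pvStepA
        simp only [htake1, htake0]
        have hread : ((d.insert (String.ofList (cs ++ [c])) ([] : List String)).getD (String.ofList cs) []) = acc := by
          rw [PySem.Dict.getD_insert_of_ne _ _ _ hne]
          exact hd
        cases hM : M.get? (String.ofList [c]) with
        | some mv =>
            rw [PySem.Dict.getD_insert_self, hread]
        | none =>
            rw [PySem.Dict.getD_insert_self, hread]
      have hrw : cs ++ c :: rest = (cs ++ [c]) ++ rest := by simp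
      have hstart : (cs.length : Int) + 1 = ((cs ++ [c]).length : Int) := by simp
      cases hM : M.get? (String.ofList [c]) with
      | some mv =>
          rw [hrw] at hval ⊢
          rw [hstart]
          rw [ih (cs ++ [c]) _ (acc.flatMap (fun x => mv.map (fun v => x ++ v)))
            (by rw [hval]; simp [hM])]
          simp [pvMFold, hM]
      | none =>
          rw [hrw] at hval ⊢
          rw [hstart]
          rw [ih (cs ++ [c]) _ acc (by rw [hval, hM])]
          simp [pvMFold, hM]

theorem pvMFold_eq_prod (M : PySem.Dict String (List String)) :
    ∀ (cs : List Char) (acc : List String),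
      pvMFold M acc cs =
        acc.flatMap (fun x =>
          (pvProdSuffix (cs.filterMap (fun c => M.get? (String.ofList [c])))).map (fun s => x ++ s)) := by
  intro cs
  induction cs with
  | nil =>
      intro acc
      simp [pvMFold, pvProdSuffix]
  | cons c cs ih =>
      intro acc
      cases hM : M.get? (String.ofList [c]) with
      | none =>
          simp only [pvMFold, hM, List.filterMap_cons, ih]
      | some mv =>
          simp only [pvMFold, hM, List.filterMap_cons, ih]
          simp only [pvProdSuffix]
          rw [List.flatMap_assoc]
          congr 1
          funext x
          rw [List.flatMap_map, List.map_flatMap]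
          congr 1
          funext v
          simp [List.map_map, Function.comp, String.append_assoc]

theorem pvLoop_main (M : PySem.Dict String (List String)) (cs : List Char) :
    (((PySem.List.enumerate cs 0).foldl (pvStepA M cs)
        ((PySem.Dict.empty).insert "" [""])).getD (String.ofList cs) []) =
      pvProdSuffix (cs.filterMap (fun c => M.get? (String.ofList [c]))) := by
  have := pvLoopA M cs [] ((PySem.Dict.empty).insert "" [""]) [""]
    (PySem.Dict.getD_insert_self (PySem.Dict.empty) "" [""] [])
  simp only [List.nil_append, List.length_nil, Nat.cast_zero] at this
  rw [this, pvMFold_eq_prod]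
  simp

-- ===== VERDICT (by name: the statement is the Claim_ definition above) =====
theorem find_possible_combinations_spec : Claim_equal_find_possible_combinations := by
  intro mappings string _
  show find_possible_combinations mappings string = find_possible_combinations_alt mappings string
  simp only [find_possible_combinations, find_possible_combinations_alt]
  have h := pvLoop_main (PySem.Dict.ofList mappings) string.toList
  rw [show String.ofList string.toList = string by simp] at h
  cases hM : (PySem.Dict.ofList mappings).get? string with
  | none =>
      exact h
  | some ms =>
      rw [h]
      split_ifs with hc
      · rw [PySem.Dict.getD_insert_self]
      · rw [PySem.Dict.getD_insert_self]
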